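-- pv_equiv track=rewrite | github.com/WANGICHEN/CDF-document | bsmi.py | count_ul
-- ===== SOURCE A (Python) =====
-- def count_ul(segs):
--     ul_count = 0
--     for s in segs:
--         if "UL" in s.upper():
--             ul_count += 1
--
--     if len(segs) > ul_count:
--         ul_del = True
--     else:
--         ul_del = False
--
--     return ul_del
-- ===== SOURCE B (Python) =====
-- def count_ul(segs):
--     return any("UL" not in s.upper() for s in segs)
-- ===== Notes on version B (the rewrite author's own statement) =====
-- stated objective: simpler
-- what changed: Replaces the count-all-then-compare-with-len arithmetic by a short-circuiting any() existence check for a segment whose upper() lacks 'UL'; no counter or length comparison is maintained.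
import Mathlib
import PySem

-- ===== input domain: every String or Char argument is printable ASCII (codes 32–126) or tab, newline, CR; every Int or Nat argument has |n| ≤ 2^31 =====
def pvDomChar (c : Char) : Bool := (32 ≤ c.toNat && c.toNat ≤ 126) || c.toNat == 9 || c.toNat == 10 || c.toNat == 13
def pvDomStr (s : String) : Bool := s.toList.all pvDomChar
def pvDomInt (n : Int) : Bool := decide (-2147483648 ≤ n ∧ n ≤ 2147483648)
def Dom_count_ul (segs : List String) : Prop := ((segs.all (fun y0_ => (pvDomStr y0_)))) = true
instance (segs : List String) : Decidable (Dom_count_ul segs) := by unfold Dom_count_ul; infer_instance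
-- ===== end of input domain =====

-- B replaces A's count-then-compare arithmetic with a short-circuiting existence check (simpler).


-- ===== PORT A =====
def count_ul (segs : List String) : Bool :=
  let ul_count : Nat :=
    segs.foldl (fun c s => if PySem.Str.isIn "UL" (PySem.Str.upper s) then c + 1 else c) 0
  if segs.length > ul_count then true else false

-- ===== PORT B =====
def count_ul_alt (segs : List String) : Bool :=
  segs.any (fun s => !(PySem.Str.isIn "UL" (PySem.Str.upper s)))

-- ===== PRECONDITION & SPEC =====
def Spec_count_ul (segs : List String) (out : Bool) : Prop := out = count_ul_alt segs
instance (segs : List String) (out : Bool) : Decidable (Spec_count_ul segs out) := by unfold Spec_count_ul; infer_instance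

-- ===== CLAIM (what is proved, stated in full; the proofs are below) =====
def Claim_equal_count_ul : Prop := ∀ (segs : List String), Dom_count_ul segs → Spec_count_ul segs (count_ul segs)

-- ===== LEMMAS AND PROOFS =====
theorem count_ul_fold (p : String → Bool) (segs : List String) (c : Nat) :
    segs.foldl (fun c s => if p s then c + 1 else c) c = c + segs.countP p := by
  induction segs generalizing c with
  | nil => simp
  | cons s t ih =>
    simp only [List.foldl_cons, List.countP_cons, ih]
    by_cases h : p s = true <;> simp [h] <;> omega

theorem count_ul_if_any (p : String → Bool) (l : List String) :
    (if l.length > l.countP p then true else false) = l.any (fun s => !(p s)) := by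
  rcases h : l.any (fun s => !(p s)) with _ | _
  · simp only [List.any_eq_false, Bool.not_eq_true', Bool.not_eq_false] at h
    have : l.countP p = l.length := List.countP_eq_length.mpr h
    simp [this]
  · simp only [List.any_eq_true, Bool.not_eq_true'] at h
    obtain ⟨x, hx, hpx⟩ := h
    have hlt : l.countP p < l.length := by
      refine Nat.lt_of_le_of_ne List.countP_le_length ?_
      intro he
      exact absurd (List.countP_eq_length.mp he x hx) (by simp [hpx])
    simp [hlt]

-- ===== VERDICT (by name: the statement is the Claim_ definition above) =====
theorem count_ul_spec : Claim_equal_count_ul := by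
  intro segs _
  unfold Spec_count_ul count_ul count_ul_alt
  rw [count_ul_fold, Nat.zero_add, count_ul_if_any]
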